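-- pv_equiv track=rewrite | github.com/yooynas/ceph-ansible | library/choose_disk.py | get_keys_by_ceph_order
-- ===== SOURCE A (Python) =====
-- def get_keys_by_ceph_order(physical_disks):
--     '''
--     Return a list of keys where ceph disks are reported first
--     while keeping the list sorted
--     '''
--     ceph_disks = []
--     non_ceph_disks = []
--     for physical_disk in sorted(physical_disks):
--         if "ceph_prepared" in physical_disks[physical_disk]:
--             ceph_disks.append(physical_disk)
--         else:
--             non_ceph_disks.append(physical_disk)
--
--     return ceph_disks + non_ceph_disks
-- ===== SOURCE B (Python) =====
-- def get_keys_by_ceph_order(physical_disks):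
--     '''
--     One stable sorted() call with a composite string key: a disk name is
--     tagged "0" when its dict has "ceph_prepared" and "1" otherwise, so
--     ceph-prepared names come first, each group in name order.
--     '''
--     return sorted(physical_disks,
--                   key=lambda d: ("0" if "ceph_prepared" in physical_disks[d] else "1") + d)
-- ===== Notes on version B (the rewrite author's own statement) =====
-- stated objective: simpler
-- what changed: Replaces the two-list partition-and-concatenate over a pre-sorted key list with a single sorted() call using a composite key (ceph tag prepended to the name), so no intermediate lists or concatenation are needed.
import Mathlib
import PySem

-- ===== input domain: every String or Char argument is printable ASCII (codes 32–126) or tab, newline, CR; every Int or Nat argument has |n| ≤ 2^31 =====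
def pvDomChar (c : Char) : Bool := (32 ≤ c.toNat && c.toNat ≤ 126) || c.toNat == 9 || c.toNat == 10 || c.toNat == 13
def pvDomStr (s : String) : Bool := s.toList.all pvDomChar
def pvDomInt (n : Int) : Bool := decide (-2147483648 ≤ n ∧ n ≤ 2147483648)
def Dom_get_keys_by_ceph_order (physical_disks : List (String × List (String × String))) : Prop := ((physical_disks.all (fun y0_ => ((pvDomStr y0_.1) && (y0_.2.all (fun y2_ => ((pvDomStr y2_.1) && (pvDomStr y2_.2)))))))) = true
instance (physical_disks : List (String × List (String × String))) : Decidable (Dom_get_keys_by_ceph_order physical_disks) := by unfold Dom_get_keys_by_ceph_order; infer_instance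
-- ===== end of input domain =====

-- ===== PORT A =====
-- B changes the decomposition only: one sorted() call with a composite key instead of
-- partitioning a pre-sorted key list into two lists and concatenating (objective: simpler).

-- '"ceph_prepared" in physical_disks[d]' : dict lookup (first match) then key membership
def pvHasCeph (physical_disks : List (String × List (String × String))) (d : String) : Bool :=
  match physical_disks.find? (fun kv => kv.1 == d) with
  | some kv => kv.2.any (fun e => e.1 == "ceph_prepared")
  | none => false

def get_keys_by_ceph_order (physical_disks : List (String × List (String × String))) : List String :=
  let r := (PySem.List.sorted (physical_disks.map Prod.fst) (fun x => x) false).foldl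
    (fun (acc : List String × List String) physical_disk =>
      if pvHasCeph physical_disks physical_disk then (acc.1 ++ [physical_disk], acc.2)
      else (acc.1, acc.2 ++ [physical_disk]))
    ([], [])
  r.1 ++ r.2

-- ===== PORT B =====
def get_keys_by_ceph_order_alt (physical_disks : List (String × List (String × String))) : List String :=
  PySem.List.sorted (physical_disks.map Prod.fst)
    (fun d => (if pvHasCeph physical_disks d then "0" else "1") ++ d) false

-- ===== PRECONDITION & SPEC =====
-- Pre_ excludes association lists with a duplicated outer key: a Python dict cannot
-- contain one, so which value such a list denotes is accidental.
def Pre_get_keys_by_ceph_order (physical_disks : List (String × List (String × String))) : Prop :=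
  (physical_disks.map Prod.fst).Nodup
instance (physical_disks : List (String × List (String × String))) : Decidable (Pre_get_keys_by_ceph_order physical_disks) := by unfold Pre_get_keys_by_ceph_order; infer_instance

def pvWitness_get_keys_by_ceph_order : (List (String × List (String × String))) :=
  [("sdb", [("bar", "x")]), ("sda", [("ceph_prepared", "kpartx")])]

def Spec_get_keys_by_ceph_order (physical_disks : List (String × List (String × String))) (out : List String) : Prop := out = get_keys_by_ceph_order_alt physical_disks
instance (physical_disks : List (String × List (String × String))) (out : List String) : Decidable (Spec_get_keys_by_ceph_order physical_disks out) := by unfold Spec_get_keys_by_ceph_order; infer_instance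

-- ===== CLAIM (what is proved, stated in full; the proofs are below) =====
def Claim_equal_get_keys_by_ceph_order : Prop := ∀ (physical_disks : List (String × List (String × String))), Dom_get_keys_by_ceph_order physical_disks → Pre_get_keys_by_ceph_order physical_disks → Spec_get_keys_by_ceph_order physical_disks (get_keys_by_ceph_order physical_disks)

-- ===== LEMMAS AND PROOFS =====

-- A's loop over two accumulating lists is a partition of the traversed list
theorem pv_foldl_partition (p : String → Bool) :
    ∀ (l a b : List String),
      l.foldl (fun (acc : List String × List String) d =>
          if p d then (acc.1 ++ [d], acc.2) else (acc.1, acc.2 ++ [d])) (a, b)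
        = (a ++ l.filter p, b ++ l.filter (fun d => !p d)) := by
  intro l
  induction l with
  | nil => simp
  | cons x t ih =>
    intro a b
    by_cases h : p x
    · simp [List.foldl_cons, h, ih]
    · simp [List.foldl_cons, h, ih]

theorem pv_lt_00 (a b : String) (h : a < b) : "0" ++ a < "0" ++ b := by
  refine String.lt_iff_toList_lt.mpr ?_
  rw [String.toList_append, String.toList_append]
  have hl : a.toList < b.toList := String.lt_iff_toList_lt.mp h
  show '0' :: a.toList < '0' :: b.toList
  exact List.cons_lt_cons_self.mpr hl

theorem pv_lt_11 (a b : String) (h : a < b) : "1" ++ a < "1" ++ b := by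
  refine String.lt_iff_toList_lt.mpr ?_
  rw [String.toList_append, String.toList_append]
  have hl : a.toList < b.toList := String.lt_iff_toList_lt.mp h
  show '1' :: a.toList < '1' :: b.toList
  exact List.cons_lt_cons_self.mpr hl

theorem pv_lt_01 (a b : String) : "0" ++ a < "1" ++ b := by
  refine String.lt_iff_toList_lt.mpr ?_
  rw [String.toList_append, String.toList_append]
  show '0' :: a.toList < '1' :: b.toList
  exact List.lex_eq_true_iff_lt.mp rfl

-- ===== VERDICT (by name: the statement is the Claim_ definition above) =====
theorem get_keys_by_ceph_order_spec : Claim_equal_get_keys_by_ceph_order := by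
  intro pd _ hnd
  unfold Spec_get_keys_by_ceph_order get_keys_by_ceph_order get_keys_by_ceph_order_alt
  set K := pd.map Prod.fst with hK
  set S := PySem.List.sorted K (fun x => x) false with hS
  rw [pv_foldl_partition]
  simp only [List.nil_append]
  -- S is strictly increasing (sorted, and Nodup by Pre_)
  have hperm : S.Perm K := PySem.List.sorted_perm K (fun x => x) false
  have hle : S.Pairwise (· ≤ ·) := by
    have := PySem.List.sorted_pairwise K (fun x => x)
    simpa using this
  have hndS : S.Nodup := hperm.nodup_iff.mpr hnd
  have hlt : S.Pairwise (· < ·) := by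
    have hne : S.Pairwise (· ≠ ·) := hndS
    exact (hle.and hne).imp (fun h => lt_of_le_of_ne h.1 h.2)
  -- the partitioned list is a key-strictly-increasing rearrangement of K
  refine (PySem.List.sorted_eq_of_perm_of_pairwise_lt _ _
    (fun d => (if pvHasCeph pd d then "0" else "1") ++ d) ?_ ?_).symm
  · exact (List.filter_append_perm (pvHasCeph pd) S).trans hperm
  · rw [List.pairwise_append]
    refine ⟨?_, ?_, ?_⟩
    · refine (hlt.filter (pvHasCeph pd)).imp_of_mem ?_
      intro a b ha hb h
      have hpa := (List.mem_filter.mp ha).2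
      have hpb := (List.mem_filter.mp hb).2
      show (if pvHasCeph pd a then "0" else "1") ++ a < (if pvHasCeph pd b then "0" else "1") ++ b
      rw [if_pos hpa, if_pos hpb]
      exact pv_lt_00 a b h
    · refine ((hlt.filter _).imp_of_mem ?_)
      intro a b ha hb h
      have hpa := (List.mem_filter.mp ha).2
      have hpb := (List.mem_filter.mp hb).2
      simp only [Bool.not_eq_true'] at hpa hpb
      show (if pvHasCeph pd a then "0" else "1") ++ a < (if pvHasCeph pd b then "0" else "1") ++ b
      rw [hpa, hpb]
      simp only [Bool.false_eq_true, if_false]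
      exact pv_lt_11 a b h
    · intro a ha b hb
      have hpa := (List.mem_filter.mp ha).2
      have hpb := (List.mem_filter.mp hb).2
      simp only [Bool.not_eq_true'] at hpb
      show (if pvHasCeph pd a then "0" else "1") ++ a < (if pvHasCeph pd b then "0" else "1") ++ b
      rw [if_pos hpa, hpb]
      simp only [Bool.false_eq_true, if_false]
      exact pv_lt_01 a b
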